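-- pv_equiv track=rewrite | github.com/winxos/python | g24_1.py | polishCombos
-- ===== SOURCE A (Python) =====
-- from itertools import product
-- from copy import deepcopy
--
-- def polishCombos(seq1,seq2):
--   out=[]
--   stacks=[list(seq1),list(seq2)]
--   for n in tuple(product(range(2),repeat=4)):
--     seq=[]
--     if (sum(n)==2 and n!=(1,1,0,0)):
--       stacks_cp = deepcopy(stacks)
--       for i in n:
--         seq.append(stacks_cp[i].pop(0))
--       out.append(seq)
--   return out
-- ===== SOURCE B (Python) =====
-- def polishCombos(seq1, seq2):
--     s1 = list(seq1)
--     s2 = list(seq2)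
--     a, b = s1[0], s1[1]
--     c, d = s2[0], s2[1]
--     return [[a, b, c, d],
--             [a, c, b, d],
--             [a, c, d, b],
--             [c, a, b, d],
--             [c, a, d, b]]
-- ===== Notes on version B (the rewrite author's own statement) =====
-- stated objective: simpler
-- what changed: Replaces the product(range(2),repeat=4)+deepcopy+stack-pop enumeration by a closed-form list of the five fixed interleavings of the first two elements of each sequence.
import Mathlib
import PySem

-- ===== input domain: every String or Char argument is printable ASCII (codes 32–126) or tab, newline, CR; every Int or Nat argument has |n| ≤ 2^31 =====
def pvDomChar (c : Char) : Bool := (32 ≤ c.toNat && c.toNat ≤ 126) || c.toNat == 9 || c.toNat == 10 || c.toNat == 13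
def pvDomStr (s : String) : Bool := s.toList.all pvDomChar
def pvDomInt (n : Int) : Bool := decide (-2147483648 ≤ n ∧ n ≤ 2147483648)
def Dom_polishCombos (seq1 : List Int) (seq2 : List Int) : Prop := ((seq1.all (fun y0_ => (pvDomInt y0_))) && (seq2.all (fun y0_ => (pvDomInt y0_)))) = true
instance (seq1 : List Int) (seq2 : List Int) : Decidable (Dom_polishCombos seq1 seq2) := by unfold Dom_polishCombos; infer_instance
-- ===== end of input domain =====

-- B replaces A's product(range(2),repeat=4)+deepcopy+pop(0) enumeration by the closed-form
-- list of the five fixed interleavings; equal output on sequences of length ≥ 2 (Pre_).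

-- ===== PORT A =====
-- product(range(2), repeat=n), in itertools order (leftmost index varies slowest)
def pyProd2 : Nat → List (List Int)
  | 0 => [[]]
  | n + 1 => ([0, 1] : List Int).flatMap (fun x => (pyProd2 n).map (fun t => x :: t))

-- one pass of the inner `for i in n` loop: state = (stacks_cp[0], stacks_cp[1], seq);
-- pop(0) is exact on Pre_ (both stacks hold ≥ 2 elements, so no pop raises)
def popStep (st : List Int × List Int × List Int) (i : Int) : List Int × List Int × List Int :=
  match st with
  | (s1, s2, seq) =>
    if i = 0 then (s1.tail, s2, seq ++ [s1.headD 0])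
    else (s1, s2.tail, seq ++ [s2.headD 0])

def polishCombos (seq1 : List Int) (seq2 : List Int) : List (List Int) :=
  (pyProd2 4).foldl
    (fun out n =>
      if n.sum = 2 ∧ n ≠ [1, 1, 0, 0] then
        out ++ [(n.foldl popStep (seq1, seq2, [])).2.2]
      else out) []

-- ===== PORT B =====
def polishCombos_alt (seq1 : List Int) (seq2 : List Int) : List (List Int) :=
  let s1 := seq1
  let s2 := seq2
  let a := s1.headD 0
  let b := s1.tail.headD 0
  let c := s2.headD 0
  let d := s2.tail.headD 0
  [[a, b, c, d], [a, c, b, d], [a, c, d, b], [c, a, b, d], [c, a, d, b]]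

-- ===== PRECONDITION & SPEC =====
-- A raises IndexError (pop from empty list) iff a sequence has fewer than 2 elements; B raises there too (s1[1]/s2[1]).
def Pre_polishCombos (seq1 : List Int) (seq2 : List Int) : Prop := 2 ≤ seq1.length ∧ 2 ≤ seq2.length
instance (seq1 : List Int) (seq2 : List Int) : Decidable (Pre_polishCombos seq1 seq2) := by unfold Pre_polishCombos; infer_instance
def pvWitness_polishCombos : List Int × List Int := ([1, 2], [3, 4])

def Spec_polishCombos (seq1 : List Int) (seq2 : List Int) (out : List (List Int)) : Prop := out = polishCombos_alt seq1 seq2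
instance (seq1 : List Int) (seq2 : List Int) (out : List (List Int)) : Decidable (Spec_polishCombos seq1 seq2 out) := by unfold Spec_polishCombos; infer_instance

-- ===== CLAIM (what is proved, stated in full; the proofs are below) =====
def Claim_equal_polishCombos : Prop := ∀ (seq1 : List Int) (seq2 : List Int), Dom_polishCombos seq1 seq2 → Pre_polishCombos seq1 seq2 → Spec_polishCombos seq1 seq2 (polishCombos seq1 seq2)

-- ===== LEMMAS AND PROOFS =====

-- ===== VERDICT (by name: the statement is the Claim_ definition above) =====
theorem polishCombos_spec : Claim_equal_polishCombos := by
  intro seq1 seq2 _ hpre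
  obtain ⟨h1, h2⟩ := hpre
  match seq1, seq2 with
  | a :: b :: t1, c :: d :: t2 =>
    simp [Spec_polishCombos, polishCombos, polishCombos_alt, pyProd2, popStep, List.foldl]
  | [], _ => simp at h1
  | [_], _ => simp at h1
  | _ :: _ :: _, [] => simp at h2
  | _ :: _ :: _, [_] => simp at h2
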